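-- pv_equiv track=rewrite | github.com/ssyng162/Algorithm | 백준/실버/BOJ4659.py | have_continuous_3_same_type
-- ===== SOURCE A (Python) =====
-- vowel = ['a', 'e', 'i', 'o', 'u']
--
-- def have_continuous_3_same_type(password):
--     if len(password) < 3:
--         return False
--
--     count = 1
--     prev_is_vowel = password[0] in vowel
--
--     for i in range(1, len(password)):
--         current_is_vowel = password[i] in vowel
--         if current_is_vowel == prev_is_vowel:
--             count += 1
--         else:
--             count = 1
--             prev_is_vowel = current_is_vowel
--         if count >= 3:
--             return True
--     return False
-- ===== SOURCE B (Python) =====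
-- vowel = ['a', 'e', 'i', 'o', 'u']
--
-- def have_continuous_3_same_type(password):
--     # staged: build type sequence, then test each fixed window of three independently
--     types = [c in vowel for c in password]
--     return any(a == b == c for a, b, c in zip(types, types[1:], types[2:]))
-- ===== Notes on version B (the rewrite author's own statement) =====
-- stated objective: idiomatic
-- what changed: B first maps the string to its vowel/consonant type sequence and then checks each fixed window of three positions independently (any over zip of three shifted lists), with no run counter, reset logic or early-return state as in A.
import Mathlib
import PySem

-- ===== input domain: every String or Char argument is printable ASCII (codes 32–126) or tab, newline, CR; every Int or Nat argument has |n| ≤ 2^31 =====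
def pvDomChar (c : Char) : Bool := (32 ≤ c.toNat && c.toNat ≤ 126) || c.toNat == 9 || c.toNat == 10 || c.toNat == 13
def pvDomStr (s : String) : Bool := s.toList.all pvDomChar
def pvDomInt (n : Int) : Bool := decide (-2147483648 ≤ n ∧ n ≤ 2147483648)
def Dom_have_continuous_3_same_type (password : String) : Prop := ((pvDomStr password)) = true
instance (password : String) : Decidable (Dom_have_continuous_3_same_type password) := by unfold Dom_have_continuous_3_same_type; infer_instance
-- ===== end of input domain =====

-- B maps the string to its vowel/consonant type sequence and checks each fixed window of three independently, instead of A's count-and-reset scan; return values proved equal on all inputs.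


-- ===== PORT A =====
-- 'c in vowel' of A
def pvIsVowelA (c : Char) : Bool := (['a', 'e', 'i', 'o', 'u'] : List Char).contains c

-- A's for-loop over the remaining characters, state (prev_is_vowel, count); the early 'return True' is returning true
def pvLoopA (prev : Bool) (count : Int) : List Char → Bool
  | [] => false
  | c :: rest =>
    let cur := pvIsVowelA c
    if cur == prev then
      if count + 1 ≥ 3 then true else pvLoopA prev (count + 1) rest
    else
      if (1 : Int) ≥ 3 then true else pvLoopA cur 1 rest

def have_continuous_3_same_type (password : String) : Bool :=
  if password.toList.length < 3 then false
  else
    match password.toList with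
    | [] => false
    | c :: rest => pvLoopA (pvIsVowelA c) 1 rest

-- ===== PORT B =====
def pvIsVowelB (c : Char) : Bool := (['a', 'e', 'i', 'o', 'u'] : List Char).contains c

-- Source B's 'any(a == b == c for a, b, c in zip(types, types[1:], types[2:]))':
-- the zip of the three shifted lists enumerates exactly the consecutive triples of the type list
def pvAnyTripleB : List Bool → Bool
  | a :: b :: c :: rest => (a == b && b == c) || pvAnyTripleB (b :: c :: rest)
  | _ => false

def have_continuous_3_same_type_alt (password : String) : Bool :=
  pvAnyTripleB (password.toList.map pvIsVowelB)

-- ===== PRECONDITION & SPEC =====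
def Spec_have_continuous_3_same_type (password : String) (out : Bool) : Prop := out = have_continuous_3_same_type_alt password
instance (password : String) (out : Bool) : Decidable (Spec_have_continuous_3_same_type password out) := by unfold Spec_have_continuous_3_same_type; infer_instance

-- ===== CLAIM =====
def Claim_equal_have_continuous_3_same_type : Prop := ∀ (password : String), Dom_have_continuous_3_same_type password → Spec_have_continuous_3_same_type password (have_continuous_3_same_type password)

-- ===== LEMMAS AND PROOFS =====

-- A's loop with the current run carried as 'count' copies of 'prev' in front equals B's window test
theorem pvLoopA_eq (l : List Char) : ∀ (prev : Bool),
    pvLoopA prev 1 l = pvAnyTripleB (prev :: l.map pvIsVowelB) ∧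
    pvLoopA prev 2 l = pvAnyTripleB (prev :: prev :: l.map pvIsVowelB) := by
  induction l with
  | nil =>
    intro prev
    constructor <;> simp [pvLoopA, pvAnyTripleB]
  | cons c rest ih =>
    intro prev
    have hAB : pvIsVowelB c = pvIsVowelA c := rfl
    by_cases hc : (pvIsVowelA c == prev) = true
    · have hceq : pvIsVowelA c = prev := by simpa using hc
      constructor
      · simp only [pvLoopA, hc, if_true]
        rw [if_neg (by omega : ¬ (1 : Int) + 1 ≥ 3)]
        have h12 : (1 : Int) + 1 = 2 := by norm_num
        rw [h12, (ih prev).2]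
        simp only [List.map_cons, hAB, hceq]
      · simp only [pvLoopA, hc, if_true]
        rw [if_pos (by omega : (2 : Int) + 1 ≥ 3)]
        simp [pvAnyTripleB, hAB, hceq]
    · have hne : pvIsVowelA c ≠ prev := by simpa using hc
      have h1 : pvLoopA prev 1 (c :: rest) = pvAnyTripleB (pvIsVowelA c :: rest.map pvIsVowelB) := by
        simp only [pvLoopA, hc]
        rw [if_neg (by omega : ¬ (1 : Int) ≥ 3)]
        exact (ih (pvIsVowelA c)).1
      have h2 : pvAnyTripleB (prev :: pvIsVowelA c :: rest.map pvIsVowelB) =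
          pvAnyTripleB (pvIsVowelA c :: rest.map pvIsVowelB) := by
        cases rest with
        | nil => simp [pvAnyTripleB]
        | cons d rs =>
          simp only [List.map_cons, pvAnyTripleB]
          have : (prev == pvIsVowelA c) = false := by
            simp [Ne.symm hne]
          simp [this]
      constructor
      · rw [h1, List.map_cons, hAB, h2]
      · have hlhs : pvLoopA prev 2 (c :: rest) = pvAnyTripleB (pvIsVowelA c :: rest.map pvIsVowelB) := by
          simp only [pvLoopA, hc]
          rw [if_neg (by simp : ¬ false = true), if_neg (by omega : ¬ (1 : Int) ≥ 3)]
          exact (ih (pvIsVowelA c)).1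
        have hpf : (prev == pvIsVowelA c) = false := by simp [Ne.symm hne]
        rw [hlhs, List.map_cons, hAB]
        simp only [pvAnyTripleB, hpf, Bool.and_false, Bool.false_or]
        rw [h2]

-- B returns false on type lists shorter than 3 (no window of three exists)
theorem pvAnyTripleB_short (l : List Bool) (h : l.length < 3) : pvAnyTripleB l = false := by
  match l, h with
  | [], _ => rfl
  | [a], _ => rfl
  | [a, b], _ => rfl

-- ===== VERDICT =====
theorem have_continuous_3_same_type_spec : Claim_equal_have_continuous_3_same_type := by
  intro password _
  unfold Spec_have_continuous_3_same_type have_continuous_3_same_type have_continuous_3_same_type_alt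
  by_cases hlen : password.toList.length < 3
  · rw [if_pos hlen, pvAnyTripleB_short _ (by simpa using hlen)]
  · rw [if_neg hlen]
    match hl : password.toList with
    | [] => exact absurd (by rw [hl]; simp) hlen
    | c :: rest =>
      show pvLoopA (pvIsVowelA c) 1 rest = pvAnyTripleB ((c :: rest).map pvIsVowelB)
      rw [(pvLoopA_eq rest (pvIsVowelA c)).1]
      rfl
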